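-- pv_equiv track=rewrite | github.com/tigergraph/pyTigerGraph | cicd/jenkins_script/python3_script/validate.py | validate_ticket_status
-- ===== SOURCE A (Python) =====
-- def validate_ticket_status(tickets, jira_contents):
--     error_msg = ""
--     d_status = {}
--
--     for ticket_id in tickets:
--         d_status[ticket_id] = jira_contents[ticket_id]["status"]['name'].upper()
--
--         # check: status is 'NO TEST' | 'TEST DONE'
--         if d_status[ticket_id].upper() not in {'NO TEST', 'TEST DONE'}:
--             error_msg = ticket_id + " JIRA ticket needs to be in status NO TEST or TEST DONE to merge, current status is " + d_status[ticket_id]  + ". "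
--
--     return error_msg
-- ===== SOURCE B (Python) =====
-- def validate_ticket_status(tickets, jira_contents):
--     # The message reports the last ticket (in list order) with a disallowed
--     # status, so scan from the end and stop at the first offender found.
--     for ticket_id in reversed(tickets):
--         status = jira_contents[ticket_id]["status"]["name"].upper()
--         if status not in {"NO TEST", "TEST DONE"}:
--             return (ticket_id
--                     + " JIRA ticket needs to be in status NO TEST or TEST DONE to merge, current status is "
--                     + status + ". ")
--     return ""
-- ===== Notes on version B (the rewrite author's own statement) =====
-- stated objective: simpler
-- what changed: B drops A's status dict and overwritten error string and instead scans the ticket list back-to-front, returning the message for the first disallowed status it meets (early exit) and "" if the scan finishes; Pre_ excludes inputs where a nested jira_contents lookup raises KeyError (there A scans forward and B backward, so they may raise at different points).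
import Mathlib
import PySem

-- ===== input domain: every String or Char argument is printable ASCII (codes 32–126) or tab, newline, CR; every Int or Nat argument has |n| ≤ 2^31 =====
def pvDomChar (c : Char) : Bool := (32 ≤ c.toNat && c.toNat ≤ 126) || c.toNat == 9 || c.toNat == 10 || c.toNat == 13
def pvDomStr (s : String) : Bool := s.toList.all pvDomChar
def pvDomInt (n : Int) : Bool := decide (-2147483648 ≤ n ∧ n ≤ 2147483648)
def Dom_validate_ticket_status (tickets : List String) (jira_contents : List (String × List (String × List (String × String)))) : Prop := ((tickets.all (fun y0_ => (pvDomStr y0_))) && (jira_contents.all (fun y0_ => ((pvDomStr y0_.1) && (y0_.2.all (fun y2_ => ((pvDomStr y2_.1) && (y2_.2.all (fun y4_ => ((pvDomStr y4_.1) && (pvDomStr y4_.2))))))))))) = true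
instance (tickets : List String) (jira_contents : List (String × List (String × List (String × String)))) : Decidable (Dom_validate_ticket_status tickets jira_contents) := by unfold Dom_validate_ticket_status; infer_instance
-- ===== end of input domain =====

-- ===== PORT A =====
-- B scans the ticket list back-to-front with an early exit instead of A's forward
-- loop that overwrites an error string and fills an unused status dict; objective: simpler.

-- jira_contents[t]["status"]["name"]: the nested dict subscripts of both Pythons
-- (none = KeyError somewhere in the chain; such inputs are excluded by Pre_).
def jiraStatusName? (jira_contents : List (String × List (String × List (String × String)))) (t : String) : Option String :=
  match List.lookup t jira_contents with
  | none => none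
  | some fields =>
    match List.lookup "status" fields with
    | none => none
    | some st => List.lookup "name" st

def validate_ticket_status (tickets : List String) (jira_contents : List (String × List (String × List (String × String)))) : String :=
  -- error_msg = ""; d_status = {}; for ticket_id in tickets: …
  (tickets.foldl
    (fun (st : String × PySem.Dict String String) ticket_id =>
      match jiraStatusName? jira_contents ticket_id with
      | none => st  -- Python raises KeyError here; such inputs are outside Pre_
      | some nm =>
        let d := st.2.insert ticket_id (PySem.Str.upper nm)   -- d_status[ticket_id] = ….upper()
        let cur := d.getD ticket_id ""                         -- d_status[ticket_id]
        if PySem.Str.upper cur == "NO TEST" || PySem.Str.upper cur == "TEST DONE" then (st.1, d)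
        else (ticket_id ++ " JIRA ticket needs to be in status NO TEST or TEST DONE to merge, current status is " ++ cur ++ ". ", d))
    ("", PySem.Dict.empty)).1

-- ===== PORT B =====
-- the 'for ticket_id in reversed(tickets): … return …' loop with early return
def pvScanBack (jira_contents : List (String × List (String × List (String × String)))) : List String → String
  | [] => ""            -- loop finished: return ""
  | t :: ts =>
    match jiraStatusName? jira_contents t with
    | none => pvScanBack jira_contents ts   -- Python raises KeyError here; outside Pre_
    | some nm =>
      let status := PySem.Str.upper nm
      if status == "NO TEST" || status == "TEST DONE" then pvScanBack jira_contents ts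
      else t ++ " JIRA ticket needs to be in status NO TEST or TEST DONE to merge, current status is " ++ status ++ ". "

def validate_ticket_status_alt (tickets : List String) (jira_contents : List (String × List (String × List (String × String)))) : String :=
  pvScanBack jira_contents tickets.reverse

-- ===== PRECONDITION & SPEC =====
-- Pre_ excludes exactly the inputs on which Python A raises KeyError: some ticket whose
-- nested jira_contents[t]["status"]["name"] chain has a missing key.
def Pre_validate_ticket_status (tickets : List String) (jira_contents : List (String × List (String × List (String × String)))) : Prop :=
  ∀ t ∈ tickets, (jiraStatusName? jira_contents t).isSome = true
instance (tickets : List String) (jira_contents : List (String × List (String × List (String × String)))) : Decidable (Pre_validate_ticket_status tickets jira_contents) := by unfold Pre_validate_ticket_status; infer_instance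

def pvWitness_validate_ticket_status : List String × (List (String × List (String × List (String × String)))) :=
  (["TG-1", "TG-2"], [("TG-1", [("status", [("name", "no test")])]), ("TG-2", [("status", [("name", "Open")])])])

def Spec_validate_ticket_status (tickets : List String) (jira_contents : List (String × List (String × List (String × String)))) (out : String) : Prop := out = validate_ticket_status_alt tickets jira_contents
instance (tickets : List String) (jira_contents : List (String × List (String × List (String × String)))) (out : String) : Decidable (Spec_validate_ticket_status tickets jira_contents out) := by unfold Spec_validate_ticket_status; infer_instance

-- ===== CLAIM (what is proved, stated in full; the proofs are below) =====
def Claim_equal_validate_ticket_status : Prop := ∀ (tickets : List String) (jira_contents : List (String × List (String × List (String × String)))), Dom_validate_ticket_status tickets jira_contents → Pre_validate_ticket_status tickets jira_contents → Spec_validate_ticket_status tickets jira_contents (validate_ticket_status tickets jira_contents)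

-- ===== LEMMAS AND PROOFS =====

theorem upperChar_idem (c : Char) : PySem.Chars.upperChar (PySem.Chars.upperChar c) = PySem.Chars.upperChar c := by
  simp only [PySem.Chars.upperChar, PySem.Chars.islower]
  split_ifs with h1 h2
  · exfalso
    simp only [Bool.and_eq_true, decide_eq_true_eq, Char.le_def, UInt32.le_iff_toNat_le] at h1 h2
    obtain ⟨a1, a2⟩ := h1
    have ha1 : 97 ≤ c.toNat := a1
    have ha2 : c.toNat ≤ 122 := a2
    have hv : Nat.isValidChar (c.toNat - 32) := Or.inl (by omega)
    rw [show Char.ofNat (c.toNat - 32) = Char.ofNatAux (c.toNat - 32) hv from by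
      unfold Char.ofNat; rw [dif_pos hv]] at h2
    obtain ⟨b1, b2⟩ := h2
    have hb : (Char.ofNatAux (c.toNat - 32) hv).toNat = c.toNat - 32 := by
      simp [Char.ofNatAux]
    have hb1 : 97 ≤ (Char.ofNatAux (c.toNat - 32) hv).toNat := b1
    omega
  · rfl
  · rfl

theorem upper_idem (s : String) : PySem.Str.upper (PySem.Str.upper s) = PySem.Str.upper s := by
  simp only [PySem.Str.upper, PySem.Chars.upper, String.toList_ofList]
  congr 1
  rw [List.map_map]
  exact List.map_congr_left (fun c _ => upperChar_idem c)

-- the predicate selecting a failing ticket, and the message both programs build for it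
def pvBad (jira_contents : List (String × List (String × List (String × String)))) (t : String) : Bool :=
  match jiraStatusName? jira_contents t with
  | none => false
  | some nm => !(PySem.Str.upper nm == "NO TEST" || PySem.Str.upper nm == "TEST DONE")

def pvMsg (jira_contents : List (String × List (String × List (String × String)))) (t : String) : String :=
  t ++ " JIRA ticket needs to be in status NO TEST or TEST DONE to merge, current status is " ++ PySem.Str.upper ((jiraStatusName? jira_contents t).getD "") ++ ". "

-- A's fold produces the message of the LAST failing ticket (or the accumulator)
theorem foldA_char (jira_contents : List (String × List (String × List (String × String)))) :
    ∀ (ts : List String) (e : String) (d : PySem.Dict String String),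
      (ts.foldl
        (fun (st : String × PySem.Dict String String) ticket_id =>
          match jiraStatusName? jira_contents ticket_id with
          | none => st
          | some nm =>
            let d := st.2.insert ticket_id (PySem.Str.upper nm)
            let cur := d.getD ticket_id ""
            if PySem.Str.upper cur == "NO TEST" || PySem.Str.upper cur == "TEST DONE" then (st.1, d)
            else (ticket_id ++ " JIRA ticket needs to be in status NO TEST or TEST DONE to merge, current status is " ++ cur ++ ". ", d))
        (e, d)).1
      = match (ts.filter (pvBad jira_contents)).getLast? with
        | none => e
        | some t => pvMsg jira_contents t := by
  intro ts
  induction ts with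
  | nil => intro e d; simp
  | cons t ts ih =>
    intro e d
    simp only [List.foldl_cons, List.filter_cons]
    cases hs : jiraStatusName? jira_contents t with
    | none =>
      simp only [pvBad, hs, Bool.false_eq_true, if_false]
      exact ih e d
    | some nm =>
      have hcur : (d.insert t (PySem.Str.upper nm)).getD t "" = PySem.Str.upper nm :=
        PySem.Dict.getD_insert_self d t (PySem.Str.upper nm) ""
      simp only [hcur, upper_idem, pvBad, hs]
      by_cases hc : (PySem.Str.upper nm == "NO TEST" || PySem.Str.upper nm == "TEST DONE") = true
      · simp only [hc, if_true, Bool.not_true, Bool.false_eq_true, if_false]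
        exact ih e (d.insert t (PySem.Str.upper nm))
      · simp only [Bool.not_eq_true] at hc
        simp only [hc, Bool.false_eq_true, if_false, Bool.not_false, if_true]
        rw [ih (t ++ " JIRA ticket needs to be in status NO TEST or TEST DONE to merge, current status is " ++ PySem.Str.upper nm ++ ". ") (d.insert t (PySem.Str.upper nm))]
        cases hl : (ts.filter (pvBad jira_contents)).getLast? with
        | none =>
          rw [List.getLast?_eq_none_iff.mp hl]
          simp [pvMsg, hs]
        | some t' =>
          rw [List.getLast?_cons, hl]
          rfl

-- B's backward scan produces the message of the FIRST failing ticket it meets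
theorem scanBack_char (jira_contents : List (String × List (String × List (String × String)))) :
    ∀ (l : List String),
      pvScanBack jira_contents l
      = match (l.filter (pvBad jira_contents)).head? with
        | none => ""
        | some t => pvMsg jira_contents t := by
  intro l
  induction l with
  | nil => simp [pvScanBack]
  | cons t ts ih =>
    simp only [pvScanBack, List.filter_cons]
    cases hs : jiraStatusName? jira_contents t with
    | none =>
      simp only [pvBad, hs, Bool.false_eq_true, if_false]
      exact ih
    | some nm =>
      simp only [pvBad, hs]
      by_cases hc : (PySem.Str.upper nm == "NO TEST" || PySem.Str.upper nm == "TEST DONE") = true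
      · simp only [hc, if_true, Bool.not_true, Bool.false_eq_true, if_false]
        exact ih
      · simp only [Bool.not_eq_true] at hc
        simp only [hc, Bool.false_eq_true, if_false, Bool.not_false, if_true, List.head?_cons]
        simp [pvMsg, hs]

-- ===== VERDICT (by name: the statement is the Claim_ definition above) =====
theorem validate_ticket_status_spec : Claim_equal_validate_ticket_status := by
  intro tickets jira_contents _ _
  unfold Spec_validate_ticket_status validate_ticket_status validate_ticket_status_alt
  rw [foldA_char jira_contents tickets "" PySem.Dict.empty, scanBack_char jira_contents]
  rw [List.filter_reverse, List.head?_reverse]
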